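-- pv_equiv track=rewrite | github.com/ziqizhang/wop | code/python/src/lanmodel/product_keyword_expander.py | select_topN
-- ===== SOURCE A (Python) =====
-- import operator
--
-- def select_topN(input_words:set, target_words:list,
--                    topN:int):
--     score_map={}
--     for iw in input_words:
--         if iw in target_words:
--             i = target_words.index(iw)
--             score_map[iw]=i
--
--     sorted_keys = sorted(score_map.items(), key=operator.itemgetter(1))
--
--     res=[]
--     count=0
--     for k in sorted_keys:
--         v = score_map[k[0]]
--
--         res.append(k[0])
--         count+=1
--         if count==topN:
--             break
--     return res
-- ===== SOURCE B (Python) =====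
-- def select_topN(input_words, target_words, topN):
--     res = []
--     seen = set()
--     for w in target_words:
--         if w in input_words and w not in seen:
--             seen.add(w)
--             res.append(w)
--             if len(res) == topN:
--                 break
--     return res
-- ===== Notes on version B (the rewrite author's own statement) =====
-- stated objective: faster
-- what changed: Replaces the score_map + sort-by-index + counted break loop with a single pass over target_words in order, keeping a seen-set and appending matching unseen words until topN are collected.
import Mathlib
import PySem

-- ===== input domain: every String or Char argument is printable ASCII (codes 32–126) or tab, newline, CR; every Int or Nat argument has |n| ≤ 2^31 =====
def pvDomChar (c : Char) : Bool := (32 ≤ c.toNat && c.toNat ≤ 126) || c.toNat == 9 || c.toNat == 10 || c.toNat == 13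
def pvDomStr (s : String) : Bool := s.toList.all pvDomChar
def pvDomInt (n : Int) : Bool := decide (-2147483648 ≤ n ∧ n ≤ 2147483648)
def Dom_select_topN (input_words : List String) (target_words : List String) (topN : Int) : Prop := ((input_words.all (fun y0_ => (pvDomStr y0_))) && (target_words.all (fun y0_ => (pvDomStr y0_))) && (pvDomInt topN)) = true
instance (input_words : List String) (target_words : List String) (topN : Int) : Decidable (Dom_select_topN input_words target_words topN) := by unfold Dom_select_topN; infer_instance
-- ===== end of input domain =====

-- B replaces A's score_map + sort-by-index + counted break loop by one pass over
-- target_words with a seen-set, appending matching unseen words until topN; same return value.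

-- ===== PORT A =====
-- the final 'for k in sorted_keys' loop of A (res/count accumulators, break when count == topN);
-- '_v' mirrors Python's unused 'v = score_map[k[0]]' (total here: k comes from score_map.items)
def selA_loop (sm : PySem.Dict String Int) (topN : Int) :
    List (String × Int) → List String → Int → List String
  | [], res, _ => res
  | k :: rest, res, count =>
      let _v := sm.getD k.1 0
      let res' := res ++ [k.1]
      let count' := count + 1
      if count' == topN then res' else selA_loop sm topN rest res' count'

def select_topN (input_words : List String) (target_words : List String) (topN : Int) : List String :=
  let score_map : PySem.Dict String Int := input_words.foldl (fun d iw =>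
    if target_words.contains iw then
      match PySem.List.index? target_words iw with
      | some i => d.insert iw (i : Int)
      | none => d
    else d) PySem.Dict.empty
  let sorted_keys := PySem.List.sorted score_map.items (fun kv => kv.2) false
  selA_loop score_map topN sorted_keys [] 0

-- ===== PORT B =====
def selB_loop (input_words : List String) (topN : Int) :
    List String → PySem.Set String → List String → List String
  | [], _, res => res
  | w :: ws, seen, res =>
      if input_words.contains w && !(PySem.Set.contains seen w) then
        let seen' := PySem.Set.add seen w
        let res' := res ++ [w]
        if ((res'.length : Int) == topN) then res' else selB_loop input_words topN ws seen' res'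
      else selB_loop input_words topN ws seen res

def select_topN_alt (input_words : List String) (target_words : List String) (topN : Int) : List String :=
  selB_loop input_words topN target_words PySem.Set.empty []

-- ===== PRECONDITION & SPEC =====
def Spec_select_topN (input_words : List String) (target_words : List String) (topN : Int) (out : List String) : Prop := out = select_topN_alt input_words target_words topN
instance (input_words : List String) (target_words : List String) (topN : Int) (out : List String) : Decidable (Spec_select_topN input_words target_words topN out) := by unfold Spec_select_topN; infer_instance

-- ===== CLAIM (what is proved, stated in full; the proofs are below) =====
def Claim_equal_select_topN : Prop := ∀ (input_words : List String) (target_words : List String) (topN : Int), Dom_select_topN input_words target_words topN → Spec_select_topN input_words target_words topN (select_topN input_words target_words topN)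

-- ===== LEMMAS AND PROOFS =====

-- common skeleton: append words one by one, stop when the accumulated length reaches topN
def consume (topN : Int) : List String → List String → List String
  | [], res => res
  | w :: ws, res =>
      let res' := res ++ [w]
      if ((res'.length : Int) == topN) then res' else consume topN ws res'

-- first occurrences in ws of words contained in chk and not in seen
def FNew (chk : List String) : List String → List String → List String
  | [], _ => []
  | w :: ws, seen =>
      if chk.contains w && !(seen.contains w) then w :: FNew chk ws (seen ++ [w])
      else FNew chk ws seen

lemma mem_FNew (chk : List String) : ∀ (ws seen : List String) (w : String),
    w ∈ FNew chk ws seen ↔ (w ∈ ws ∧ w ∈ chk ∧ w ∉ seen) := by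
  intro ws
  induction ws with
  | nil => intro seen w; simp [FNew]
  | cons u ws ih =>
    intro seen w
    by_cases h1 : u ∈ chk <;> by_cases h2 : u ∈ seen <;>
      simp only [FNew, List.contains_eq_mem, h1, h2, decide_true, decide_false,
        Bool.not_true, Bool.not_false, Bool.and_true, Bool.and_false, Bool.true_and,
        Bool.false_and, if_true, if_false, List.mem_cons, ih, List.mem_append,
        List.mem_singleton, Bool.false_eq_true] <;>
      constructor <;> intro h <;> first
        | (rcases h with h | h
           · subst h; tauto
           · tauto)
        | tauto

lemma nodup_FNew (chk : List String) : ∀ (ws seen : List String), (FNew chk ws seen).Nodup := by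
  intro ws
  induction ws with
  | nil => intro seen; simp [FNew]
  | cons u ws ih =>
    intro seen
    by_cases hc : (chk.contains u && !(seen.contains u)) = true
    · rw [FNew, if_pos hc]
      rw [List.nodup_cons]
      refine ⟨fun hmem => ?_, ih _⟩
      have := (mem_FNew chk ws (seen ++ [u]) u).mp hmem
      exact this.2.2 (by simp)
    · rw [FNew, if_neg hc]
      exact ih seen

lemma pairwise_FNew (chk : List String) : ∀ (ws seen : List String),
    (FNew chk ws seen).Pairwise (fun a b => ws.idxOf a < ws.idxOf b) := by
  intro ws
  induction ws with
  | nil => intro seen; simp [FNew]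
  | cons u ws ih =>
    intro seen
    have lift : ∀ s, ((FNew chk ws s).Pairwise (fun a b => ws.idxOf a < ws.idxOf b)) →
        (∀ w ∈ FNew chk ws s, w ≠ u) →
        (FNew chk ws s).Pairwise (fun a b => (u :: ws).idxOf a < (u :: ws).idxOf b) := by
      intro s hp hne
      refine List.Pairwise.imp_of_mem ?_ hp
      intro a b ha hb h
      rw [List.idxOf_cons_ne _ (fun e => hne a ha e.symm),
          List.idxOf_cons_ne _ (fun e => hne b hb e.symm)]
      omega
    by_cases hc : (chk.contains u && !(seen.contains u)) = true
    · rw [FNew, if_pos hc]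
      rw [List.pairwise_cons]
      have hne : ∀ w ∈ FNew chk ws (seen ++ [u]), w ≠ u := by
        intro w hw he
        have := (mem_FNew chk ws (seen ++ [u]) w).mp hw
        exact this.2.2 (by simp [he])
      refine ⟨fun b hb => ?_, lift _ (ih _) hne⟩
      rw [List.idxOf_cons_self, List.idxOf_cons_ne _ (fun e => hne b hb e.symm)]
      omega
    · rw [FNew, if_neg hc]
      have hne : ∀ w ∈ FNew chk ws seen, w ≠ u := by
        intro w hw he
        have hm := (mem_FNew chk ws seen w).mp hw
        subst he
        simp only [Bool.and_eq_true, not_and, Bool.not_eq_true', List.contains_eq_mem,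
          decide_eq_true_eq, decide_eq_false_iff_not] at hc
        by_cases hin : w ∈ chk
        · exact hm.2.2 (by
            by_contra hns
            exact absurd (hc (by simpa using hin)) (by simpa [hns]))
        · exact hin hm.2.1
      exact lift _ (ih _) hne

-- B's loop is 'consume' over 'FNew input_words'
lemma selB_loop_eq (inp : List String) (topN : Int) : ∀ (ws : List String) (seen res : List String),
    selB_loop inp topN ws seen res = consume topN (FNew inp ws seen) res := by
  intro ws
  induction ws with
  | nil => intro seen res; simp [selB_loop, FNew, consume]
  | cons w ws ih =>
    intro seen res
    by_cases hc : (inp.contains w && !(PySem.Set.contains seen w)) = true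
    · have hcl : (inp.contains w && !(seen.contains w)) = true := by
        simpa [PySem.Set.contains] using hc
      have hns : seen.contains w = false := by
        simp only [Bool.and_eq_true, Bool.not_eq_true'] at hcl
        exact hcl.2
      have hwseen : w ∉ seen := by simpa using hns
      have hadd : PySem.Set.add seen w = seen ++ [w] := by
        simp [PySem.Set.add, PySem.Set.contains, hns, hwseen]
      rw [selB_loop, if_pos hc, FNew, if_pos hcl, hadd]
      simp only [ih]
      conv_rhs => rw [consume]
    · have hcl : ¬ ((inp.contains w && !(seen.contains w)) = true) := by
        simpa [PySem.Set.contains] using hc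
      rw [selB_loop, if_neg hc]
      rw [FNew, if_neg hcl]
      exact ih seen res

-- A's final loop is 'consume' over the first components (count tracks res.length)
lemma selA_loop_eq (sm : PySem.Dict String Int) (topN : Int) :
    ∀ (pairs : List (String × Int)) (res : List String),
    selA_loop sm topN pairs res (res.length : Int) = consume topN (pairs.map Prod.fst) res := by
  intro pairs
  induction pairs with
  | nil => intro res; simp [selA_loop, consume]
  | cons k rest ih =>
    intro res
    simp only [selA_loop, List.map_cons, consume]
    have hlen : ((res ++ [k.1]).length : Int) = (res.length : Int) + 1 := by
      simp [List.length_append]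
    rw [hlen]
    by_cases h : ((res.length : Int) + 1 == topN)
    · simp [h]
    · simp only [h, if_neg (by simpa using h), Bool.not_eq_true] at *
      have := ih (res ++ [k.1])
      rw [hlen] at this
      simpa [h] using this

-- the score_map fold appends exactly the fresh target-hitting words with their indices
lemma index?_of_mem {xs : List String} {w : String} (h : w ∈ xs) :
    PySem.List.index? xs w = some (xs.idxOf w) := by
  induction xs with
  | nil => simp at h
  | cons x xs ih =>
    by_cases he : x = w
    · subst he
      rw [PySem.List.index?_cons_self]
      simp [List.idxOf_cons_self]
    · have hw : w ∈ xs := by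
        rcases List.mem_cons.mp h with h1 | h1
        · exact absurd h1.symm he
        · exact h1
      rw [PySem.List.index?_cons_of_ne _ he, ih hw, List.idxOf_cons_ne _ he]
      simp

lemma fold_items (tgt : List String) :
    ∀ (inp : List String) (d : PySem.Dict String Int),
    d.keys.Nodup →
    (∀ k v, d.get? k = some v → v = (tgt.idxOf k : Int)) →
    (inp.foldl (fun d iw =>
      if tgt.contains iw then
        match PySem.List.index? tgt iw with
        | some i => d.insert iw (i : Int)
        | none => d
      else d) d).items = d.items ++ (FNew tgt inp d.keys).map (fun w => (w, (tgt.idxOf w : Int))) := by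
  intro inp
  induction inp with
  | nil => intro d hnd hinv; simp [FNew]
  | cons w inp ih =>
    intro d hnd hinv
    by_cases ht : w ∈ tgt
    · have htc : tgt.contains w = true := by simpa using ht
      rw [List.foldl_cons]
      simp only [htc, if_true, index?_of_mem ht]
      by_cases hdc : d.contains w = true
      · -- overwrite with the identical pair: the dict is unchanged
        have hgw : d.get? w = some ((tgt.idxOf w : Int)) := by
          have hsome : (d.get? w).isSome := by
            rw [← PySem.Dict.contains_eq_isSome_get?]; exact hdc
          rcases Option.isSome_iff_exists.mp hsome with ⟨v, hv⟩
          rw [hv, hinv w v hv]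
        have heq : d.insert w ((tgt.idxOf w : Nat) : Int) = d := by
          apply PySem.Dict.ext
          rw [PySem.Dict.items_insert_of_contains _ _ hdc]
          have : ∀ p ∈ d.items, (if p.1 == w then (w, ((tgt.idxOf w : Nat) : Int)) else p) = p := by
            intro p hp
            by_cases hpw : p.1 = w
            · have hg := PySem.Dict.get?_of_mem_items _ (by simpa using hp) hnd
              rw [hpw] at hg
              rw [hg] at hgw
              have h2 : p.2 = ((tgt.idxOf w : Nat) : Int) := by simpa using hgw
              rw [if_pos (by simp [hpw])]
              simp [Prod.ext_iff, hpw, h2]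
            · simp [hpw]
          rw [List.map_congr_left this]
          simp
        rw [heq]
        have hkc : d.keys.contains w = true := by
          simp only [List.contains_eq_mem, decide_eq_true_eq]
          exact (PySem.Dict.contains_iff_mem_keys _ _).mp hdc
        have hcond : ¬ ((tgt.contains w && !(d.keys.contains w)) = true) := by
          simp only [hkc]; simp
        rw [FNew, if_neg hcond]
        exact ih d hnd hinv
      · -- fresh key: items and keys both append
        have hkc : d.keys.contains w = false := by
          simp only [List.contains_eq_mem, decide_eq_false_iff_not]
          intro hm
          exact hdc ((PySem.Dict.contains_iff_mem_keys _ _).mpr hm)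
        have hitems := PySem.Dict.items_insert_of_not_contains (d := d) (k := w)
          (v := ((tgt.idxOf w : Nat) : Int)) (by simpa using hdc)
        have hkeys := PySem.Dict.keys_insert_of_not_contains (d := d) (k := w)
          (v := ((tgt.idxOf w : Nat) : Int)) (by simpa using hdc)
        have hnd' : (d.insert w ((tgt.idxOf w : Nat) : Int)).keys.Nodup := by
          rw [hkeys]
          refine List.Nodup.append hnd (List.nodup_singleton w) ?_
          intro a ha hb
          simp only [List.mem_singleton] at hb
          subst hb
          exact (by simpa [ha] using hkc)
        have hinv' : ∀ k v, (d.insert w ((tgt.idxOf w : Nat) : Int)).get? k = some v →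
            v = (tgt.idxOf k : Int) := by
          intro k v hv
          rw [PySem.Dict.get?_insert] at hv
          by_cases hkw : k = w
          · simp only [hkw, if_true] at hv; rw [hkw]; exact (Option.some.injEq _ _ ▸ hv).symm
          · exact hinv k v (by simpa [hkw] using hv)
        have := ih (d.insert w ((tgt.idxOf w : Nat) : Int)) hnd' hinv'
        rw [this, hitems, hkeys]
        have hcond : (tgt.contains w && !(d.keys.contains w)) = true := by
          simp only [htc, hkc]; simp
        rw [FNew, if_pos hcond]
        simp
    · have htc : tgt.contains w = false := by simpa using ht
      rw [List.foldl_cons]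
      simp only [htc, if_false, Bool.false_eq_true]
      have hcond : ¬ ((tgt.contains w && !(d.keys.contains w)) = true) := by
        simp only [htc]; simp
      rw [FNew, if_neg hcond]
      exact ih d hnd hinv

-- the two dedup orders are permutations of each other, so the sort is the target-order list
lemma sorted_items_eq (inp tgt : List String) :
    PySem.List.sorted ((FNew tgt inp []).map (fun w => (w, (tgt.idxOf w : Int))))
      (fun kv => kv.2) false
      = (FNew inp tgt []).map (fun w => (w, (tgt.idxOf w : Int))) := by
  apply PySem.List.sorted_eq_of_perm_of_pairwise_lt
  · apply List.Perm.map
    rw [List.perm_ext_iff_of_nodup (nodup_FNew inp tgt []) (nodup_FNew tgt inp [])]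
    intro a
    rw [mem_FNew, mem_FNew]
    constructor
    · rintro ⟨h1, h2, _⟩; exact ⟨h2, h1, by simp⟩
    · rintro ⟨h1, h2, _⟩; exact ⟨h2, h1, by simp⟩
  · have hp := pairwise_FNew inp tgt []
    refine List.pairwise_map.mpr (List.Pairwise.imp ?_ hp)
    intro a b h
    simpa using Int.ofNat_lt.mpr h

-- ===== VERDICT (by name: the statement is the Claim_ definition above) =====
theorem select_topN_spec : Claim_equal_select_topN := by
  intro inp tgt topN _
  unfold Spec_select_topN select_topN select_topN_alt
  have hitems := fold_items tgt inp PySem.Dict.empty (by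
      simp [PySem.Dict.keys, PySem.Dict.empty, PySem.Dict.items]) (by
    intro k v hv; simp [PySem.Dict.get?_empty] at hv)
  simp only [PySem.Dict.items, PySem.Dict.empty] at hitems ⊢
  rw [hitems]
  simp only [PySem.Dict.keys, PySem.Dict.empty, List.map_nil, List.nil_append]
  rw [sorted_items_eq inp tgt]
  rw [show (0 : Int) = (([] : List String).length : Int) by simp]
  rw [selA_loop_eq, selB_loop_eq]
  have hmap : List.map Prod.fst
      (List.map (fun w => (w, ((tgt.idxOf w : Nat) : Int))) (FNew inp tgt []))
      = FNew inp tgt [] := by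
    rw [List.map_map]
    exact (List.map_congr_left (g := id) (fun a _ => rfl)).trans (List.map_id _)
  rw [hmap]
  rfl
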